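-- pv_equiv track=rewrite | github.com/HarshdeepAthawale/Transformer-based-end-to-end-Web-Application-Firewall-WAF-pipeline | gateway/cache_tags.py | extract_cache_tags
-- ===== SOURCE A (Python) =====
-- def extract_cache_tags(response_headers: dict, path: str) -> list[str]:
--     """Extract cache tags from response headers and auto-generate path-based tags.
--
--     Sources:
--     - Cache-Tag header (comma-separated)
--     - Surrogate-Key header (space-separated, Fastly convention)
--     - Auto-generated path prefix tags
--
--     Example: path=/api/users/123 -> tags:
--       ['path:/api/users/123', 'prefix:/api/users', 'prefix:/api']
--     """
--     tags: list[str] = []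
--
--     # Cache-Tag header (comma-separated)
--     cache_tag = response_headers.get("cache-tag") or response_headers.get("Cache-Tag")
--     if cache_tag:
--         tags.extend(t.strip() for t in cache_tag.split(",") if t.strip())
--
--     # Surrogate-Key header (space-separated, Fastly/Varnish convention)
--     surrogate_key = response_headers.get("surrogate-key") or response_headers.get("Surrogate-Key")
--     if surrogate_key:
--         tags.extend(k.strip() for k in surrogate_key.split() if k.strip())
--
--     # Auto-generate path-based tags
--     if path:
--         clean_path = path.split("?")[0].rstrip("/")
--         if clean_path:
--             tags.append(f"path:{clean_path}")
--             parts = clean_path.split("/")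
--             # Generate prefix tags for each path segment
--             for i in range(2, len(parts)):
--                 prefix = "/".join(parts[:i])
--                 if prefix:
--                     tags.append(f"prefix:{prefix}")
--
--     return tags
-- ===== SOURCE B (Python) =====
-- def _first_nonempty(headers, keys):
--     for k in keys:
--         v = headers.get(k)
--         if v:
--             return v
--     return ""
--
--
-- def _tokens(value, sep):
--     raw = value.split(sep) if sep is not None else value.split()
--     return [t for t in (p.strip() for p in raw) if t]
--
--
-- def _path_tags(path):
--     clean = path.partition("?")[0].rstrip("/")
--     if not clean:
--         return []
--     prefixes = []
--     seen = False
--     cur = ""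
--     for ch in clean:
--         if ch == "/":
--             if seen:
--                 prefixes.append("prefix:" + cur)
--             seen = True
--         cur += ch
--     return ["path:" + clean] + prefixes
--
--
-- def extract_cache_tags(response_headers: dict, path: str) -> list[str]:
--     """Same tags as A, built as three independent pieces: a generic header-token
--     helper over a key-priority list, and a one-pass character scan for prefixes."""
--     return (_tokens(_first_nonempty(response_headers, ("cache-tag", "Cache-Tag")), ",")
--             + _tokens(_first_nonempty(response_headers, ("surrogate-key", "Surrogate-Key")), None)
--             + _path_tags(path))
-- ===== Notes on version B (the rewrite author's own statement) =====
-- stated objective: alternative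
-- what changed: B is decomposed into three independently computed pieces concatenated at the end: a generic _tokens(_first_nonempty(...)) helper applied to a key-priority list replaces the two inline or-chain header blocks, and a single stateful character scan (seen-slash flag + growing current prefix) replaces A's split-into-segments plus join(parts[:i]) loop.
import Mathlib
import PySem

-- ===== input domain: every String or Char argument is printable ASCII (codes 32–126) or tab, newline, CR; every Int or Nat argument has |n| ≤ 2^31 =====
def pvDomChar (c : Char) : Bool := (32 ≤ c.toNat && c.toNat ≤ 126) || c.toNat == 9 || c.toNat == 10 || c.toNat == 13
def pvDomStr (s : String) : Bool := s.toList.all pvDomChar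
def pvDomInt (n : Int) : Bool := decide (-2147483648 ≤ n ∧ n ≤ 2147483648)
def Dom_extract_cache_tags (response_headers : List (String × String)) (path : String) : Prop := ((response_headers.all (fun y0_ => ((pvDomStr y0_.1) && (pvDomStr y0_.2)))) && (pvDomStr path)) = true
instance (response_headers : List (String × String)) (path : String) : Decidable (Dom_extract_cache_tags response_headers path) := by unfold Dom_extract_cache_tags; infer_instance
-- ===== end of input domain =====

-- B rebuilds the result as three independently computed pieces (a generic header-token
-- helper over a key-priority list, and a single character scan for the prefix tags)
-- instead of A's one mutated list with a segment-split/re-join loop; return value unchanged.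

-- ===== PORT A =====
-- tags collected from the two header blocks (tags = []; the two `if header:` extends)
def pvA_headerTags (response_headers : List (String × String)) : List String :=
  let tags : List String := []
  -- cache_tag = response_headers.get("cache-tag") or response_headers.get("Cache-Tag")
  let cache_tag : Option String :=
    match PySem.Dict.get? ⟨response_headers⟩ "cache-tag" with
    | some s => if s.toList ≠ [] then some s else PySem.Dict.get? ⟨response_headers⟩ "Cache-Tag"
    | none => PySem.Dict.get? ⟨response_headers⟩ "Cache-Tag"
  let tags :=
    match cache_tag with
    | some s =>
        if s.toList ≠ [] then  -- `if cache_tag:` truthiness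
          tags ++ ((PySem.Chars.splitOn s.toList [',']).filter
                    (fun t => PySem.Chars.strip t ≠ [])).map
                  (fun t => String.ofList (PySem.Chars.strip t))
        else tags
    | none => tags
  -- surrogate_key = response_headers.get("surrogate-key") or response_headers.get("Surrogate-Key")
  let surrogate_key : Option String :=
    match PySem.Dict.get? ⟨response_headers⟩ "surrogate-key" with
    | some s => if s.toList ≠ [] then some s else PySem.Dict.get? ⟨response_headers⟩ "Surrogate-Key"
    | none => PySem.Dict.get? ⟨response_headers⟩ "Surrogate-Key"
  let tags :=
    match surrogate_key with
    | some s =>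
        if s.toList ≠ [] then
          tags ++ ((PySem.Chars.split₀ s.toList).filter
                    (fun k => PySem.Chars.strip k ≠ [])).map
                  (fun k => String.ofList (PySem.Chars.strip k))
        else tags
    | none => tags
  tags

-- the `if path:` block of A
def pvA_pathTags (tags : List String) (path : List Char) : List String :=
  if path ≠ [] then
    -- clean_path = path.split("?")[0].rstrip("/")  (split never returns an empty list, so [0] is headD;
    -- rstrip("/") ported by hand: drop trailing '/' characters — exact for a one-char strip set)
    let clean := (((PySem.Chars.splitOn path ['?']).headD []).reverse.dropWhile (fun c => c == '/')).reverse
    if clean ≠ [] then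
      let tags := tags ++ [String.ofList ("path:".toList ++ clean)]
      let parts := PySem.Chars.splitOn clean ['/']
      (PySem.List.pyRange 2 (parts.length : Int) 1).foldl
        (fun acc i =>
          let pre := PySem.Chars.join ['/'] (parts.take i.toNat)
          if pre ≠ [] then acc ++ [String.ofList ("prefix:".toList ++ pre)] else acc)
        tags
    else tags
  else tags

def extract_cache_tags (response_headers : List (String × String)) (path : String) : List String :=
  pvA_pathTags (pvA_headerTags response_headers) path.toList

-- ===== PORT B =====
-- _first_nonempty: first truthy headers.get(k) along the key list, "" if none
def pvB_firstNonempty (rh : List (String × String)) : List String → String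
  | [] => ""
  | k :: ks =>
    match PySem.Dict.get? ⟨rh⟩ k with
    | some v => if v.toList ≠ [] then v else pvB_firstNonempty rh ks
    | none => pvB_firstNonempty rh ks

-- _tokens: split (by a char, or whitespace for none), strip each piece, keep the non-empty ones
def pvB_tokens (v : String) (sep : Option Char) : List String :=
  let raw :=
    match sep with
    | some c => PySem.Chars.splitOn v.toList [c]
    | none => PySem.Chars.split₀ v.toList
  ((raw.map PySem.Chars.strip).filter (fun t => t ≠ [])).map String.ofList

-- the `for ch in clean` loop of _path_tags: seen/cur/prefixes state, one char at a time
def pvB_scan : List Char → Bool → List Char → List String → List String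
  | [], _, _, out => out
  | c :: t, seen, cur, out =>
    if c = '/' then
      pvB_scan t true (cur ++ [c])
        (if seen then out ++ [String.ofList ("prefix:".toList ++ cur)] else out)
    else
      pvB_scan t seen (cur ++ [c]) out

def pvB_pathTags (path : List Char) : List String :=
  -- clean = path.partition("?")[0].rstrip("/")  (partition("?")[0] = chars before the first '?',
  -- exact as takeWhile; rstrip("/") ported by hand as in A)
  let clean := ((path.takeWhile (fun c => !(c == '?'))).reverse.dropWhile (fun c => c == '/')).reverse
  if clean ≠ [] then
    String.ofList ("path:".toList ++ clean) :: pvB_scan clean false [] []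
  else []

def extract_cache_tags_alt (response_headers : List (String × String)) (path : String) : List String :=
  pvB_tokens (pvB_firstNonempty response_headers ["cache-tag", "Cache-Tag"]) (some ',')
    ++ pvB_tokens (pvB_firstNonempty response_headers ["surrogate-key", "Surrogate-Key"]) none
    ++ pvB_pathTags path.toList

-- ===== PRECONDITION & SPEC =====
def Spec_extract_cache_tags (response_headers : List (String × String)) (path : String) (out : List String) : Prop := out = extract_cache_tags_alt response_headers path
instance (response_headers : List (String × String)) (path : String) (out : List String) : Decidable (Spec_extract_cache_tags response_headers path out) := by unfold Spec_extract_cache_tags; infer_instance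

-- ===== CLAIM (what is proved, stated in full; the proofs are below) =====
def Claim_equal_extract_cache_tags : Prop := ∀ (response_headers : List (String × String)) (path : String), Dom_extract_cache_tags response_headers path → Spec_extract_cache_tags response_headers path (extract_cache_tags response_headers path)

-- ===== LEMMAS AND PROOFS =====

-- structural single-char split: (first piece, remaining pieces)
def pvSplit1 (sep : Char) : List Char → List Char × List (List Char)
  | [] => ([], [])
  | c :: t =>
    let p := pvSplit1 sep t
    if c = sep then ([], p.1 :: p.2) else (c :: p.1, p.2)

lemma pvGo_eq (sep : Char) : ∀ (l : List Char) (fuel : Nat) (cur : List Char) (acc : List (List Char)),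
    l.length < fuel →
    PySem.Chars.splitOn.go [sep] fuel l cur acc =
      acc.reverse ++ (cur.reverse ++ (pvSplit1 sep l).1) :: (pvSplit1 sep l).2 := by
  intro l
  induction l with
  | nil =>
    intro fuel cur acc hf
    match fuel, hf with
    | f + 1, _ => simp [PySem.Chars.splitOn.go, pvSplit1]
  | cons c t ih =>
    intro fuel cur acc hf
    match fuel, hf with
    | f + 1, hf =>
      by_cases hc : c = sep
      · rw [show PySem.Chars.splitOn.go [sep] (f + 1) (c :: t) cur acc
              = PySem.Chars.splitOn.go [sep] f t [] (cur.reverse :: acc) by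
            simp [PySem.Chars.splitOn.go, List.isPrefixOf, hc]]
        rw [ih f [] (cur.reverse :: acc) (by simpa using hf)]
        simp [pvSplit1, hc]
      · rw [show PySem.Chars.splitOn.go [sep] (f + 1) (c :: t) cur acc
              = PySem.Chars.splitOn.go [sep] f t (c :: cur) acc by
            simp [PySem.Chars.splitOn.go, List.isPrefixOf, Ne.symm hc]]
        rw [ih f (c :: cur) acc (by simpa using hf)]
        simp [pvSplit1, hc]

lemma pvSplitOn_single (sep : Char) (cs : List Char) :
    PySem.Chars.splitOn cs [sep] = (pvSplit1 sep cs).1 :: (pvSplit1 sep cs).2 := by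
  unfold PySem.Chars.splitOn
  rw [pvGo_eq sep cs (cs.length + 1) [] [] (by omega)]
  simp

lemma pvSplit1_fst (sep : Char) : ∀ cs : List Char,
    (pvSplit1 sep cs).1 = cs.takeWhile (fun c => !(c == sep)) := by
  intro cs
  induction cs with
  | nil => rfl
  | cons c t ih =>
    by_cases hc : c = sep
    · simp [pvSplit1, hc]
    · simp [pvSplit1, hc, ih]

-- header blocks: A's or-chain + conditional extend = tokens of the first non-empty value
lemma pvChain_eq (rh : List (String × String)) (k1 k2 : String) (tags : List String)
    (fA fB : String → List String) (hAB : ∀ s, fA s = fB s) (hEmpty : fB "" = []) :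
    (match (match PySem.Dict.get? ⟨rh⟩ k1 with
            | some s => if s.toList ≠ [] then some s else PySem.Dict.get? ⟨rh⟩ k2
            | none => PySem.Dict.get? ⟨rh⟩ k2) with
     | some s => if s.toList ≠ [] then tags ++ fA s else tags
     | none => tags)
    = tags ++ fB (pvB_firstNonempty rh [k1, k2]) := by
  cases h1 : PySem.Dict.get? ⟨rh⟩ k1 with
  | some s =>
    by_cases hs : s.toList = []
    · cases h2 : PySem.Dict.get? ⟨rh⟩ k2 with
      | some t =>
        by_cases ht : t.toList = []
        · simp [pvB_firstNonempty, h1, h2, hs, ht, hEmpty]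
        · simp [pvB_firstNonempty, h1, h2, hs, ht, hAB t]
      | none => simp [pvB_firstNonempty, h1, h2, hs, hEmpty]
    · simp [pvB_firstNonempty, h1, hs, hAB s]
  | none =>
    cases h2 : PySem.Dict.get? ⟨rh⟩ k2 with
    | some t =>
      by_cases ht : t.toList = []
      · simp [pvB_firstNonempty, h1, h2, ht, hEmpty]
      · simp [pvB_firstNonempty, h1, h2, ht, hAB t]
    | none => simp [pvB_firstNonempty, h1, h2, hEmpty]

-- A's filter-then-strip tokens = B's strip-then-filter tokens
lemma pvTokens_eq (raw : List (List Char)) :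
    (raw.filter (fun t => PySem.Chars.strip t ≠ [])).map (fun t => String.ofList (PySem.Chars.strip t))
    = ((raw.map PySem.Chars.strip).filter (fun t => t ≠ [])).map String.ofList := by
  rw [List.filter_map, List.map_map]
  rfl

lemma pvHeader_eq (rh : List (String × String)) :
    pvA_headerTags rh =
      pvB_tokens (pvB_firstNonempty rh ["cache-tag", "Cache-Tag"]) (some ',')
        ++ pvB_tokens (pvB_firstNonempty rh ["surrogate-key", "Surrogate-Key"]) none := by
  unfold pvA_headerTags
  simp only []
  rw [pvChain_eq rh "cache-tag" "Cache-Tag" []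
        (fun s => ((PySem.Chars.splitOn s.toList [',']).filter
                    (fun t => PySem.Chars.strip t ≠ [])).map
                  (fun t => String.ofList (PySem.Chars.strip t)))
        (fun s => pvB_tokens s (some ','))
        (fun s => pvTokens_eq _) (by decide)]
  rw [pvChain_eq rh "surrogate-key" "Surrogate-Key" _
        (fun s => ((PySem.Chars.split₀ s.toList).filter
                    (fun k => PySem.Chars.strip k ≠ [])).map
                  (fun k => String.ofList (PySem.Chars.strip k)))
        (fun s => pvB_tokens s none)
        (fun s => pvTokens_eq _) (by decide)]
  simp

-- slash-position prefixes (relative form)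
def pvSlashTakes : List Char → List (List Char)
  | [] => []
  | c :: t => (if c = '/' then [[]] else []) ++ (pvSlashTakes t).map (c :: ·)

lemma pvJ1 (sep : List Char) (c : Char) (h : List Char) : ∀ X,
    PySem.Chars.join sep ((c :: h) :: X) = c :: PySem.Chars.join sep (h :: X) := by
  intro X
  cases X with
  | nil => simp [PySem.Chars.join_singleton]
  | cons y ys => simp [PySem.Chars.join_cons_cons]

lemma pvJ2 (h : List Char) (X : List (List Char)) :
    PySem.Chars.join ['/'] ([] :: h :: X) = '/' :: PySem.Chars.join ['/'] (h :: X) := by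
  simp [PySem.Chars.join_cons_cons]

lemma pvJoin_ne_nil (p q : List Char) (X : List (List Char)) :
    PySem.Chars.join ['/'] (p :: q :: X) ≠ [] := by
  simp [PySem.Chars.join_cons_cons]

-- core: slash-position prefixes = joins of the first i split pieces, i = 1 .. #slashes
lemma pvCore : ∀ cs : List Char,
    pvSlashTakes cs =
      (List.range' 1 (pvSplit1 '/' cs).2.length).map
        (fun i => PySem.Chars.join ['/'] (((pvSplit1 '/' cs).1 :: (pvSplit1 '/' cs).2).take i)) := by
  intro cs
  induction cs with
  | nil => simp [pvSlashTakes, pvSplit1]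
  | cons c t ih =>
    by_cases hc : c = '/'
    · have h1 : pvSplit1 '/' (c :: t) = ([], (pvSplit1 '/' t).1 :: (pvSplit1 '/' t).2) := by
        simp [pvSplit1, hc]
      rw [h1]
      simp only [List.length_cons, List.range'_succ, List.map_cons]
      rw [show pvSlashTakes (c :: t) = [] :: (pvSlashTakes t).map (c :: ·) by simp [pvSlashTakes, hc]]
      congr 1
      rw [ih, hc, List.map_map]
      rw [← List.map_add_range' (a := 1) 1 (pvSplit1 '/' t).2.length 1]
      rw [List.map_map]
      refine List.map_congr_left ?_
      intro i hi
      rw [List.mem_range'_1] at hi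
      obtain ⟨k, rfl⟩ : ∃ k, i = k + 1 := ⟨i - 1, by omega⟩
      simp only [Function.comp_apply]
      rw [show 1 + (k + 1) = (k + 1) + 1 by ring, List.take_succ_cons, List.take_succ_cons]
      rw [List.take_succ_cons, pvJ2]
    · have h1 : pvSplit1 '/' (c :: t) = (c :: (pvSplit1 '/' t).1, (pvSplit1 '/' t).2) := by
        simp [pvSplit1, hc]
      rw [h1]
      rw [show pvSlashTakes (c :: t) = (pvSlashTakes t).map (c :: ·) by simp [pvSlashTakes, hc]]
      rw [ih, List.map_map]
      refine List.map_congr_left ?_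
      intro i hi
      rw [List.mem_range'_1] at hi
      obtain ⟨k, rfl⟩ : ∃ k, i = k + 1 := ⟨i - 1, by omega⟩
      simp only [Function.comp_apply]
      rw [List.take_succ_cons, List.take_succ_cons, pvJ1]

lemma pvDropCore (clean : List Char) :
    (pvSlashTakes clean).drop 1 =
      (List.range ((pvSplit1 '/' clean).2.length - 1)).map
        (fun k => PySem.Chars.join ['/']
          (((pvSplit1 '/' clean).1 :: (pvSplit1 '/' clean).2).take (2 + k))) := by
  rw [pvCore]
  cases hn : (pvSplit1 '/' clean).2.length with
  | zero => simp
  | succ m =>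
    rw [List.range'_succ]
    simp only [List.map_cons, List.drop_succ_cons, List.drop_zero, Nat.add_sub_cancel]
    rw [List.range'_eq_map_range, List.map_map]
    rfl

-- A's prefix loop in terms of pvSlashTakes
lemma pvA_prefix (clean : List Char) (tags : List String) :
    (PySem.List.pyRange 2 (((PySem.Chars.splitOn clean ['/']).length : Nat) : Int) 1).foldl
      (fun acc i =>
        let pre := PySem.Chars.join ['/'] ((PySem.Chars.splitOn clean ['/']).take i.toNat)
        if pre ≠ [] then acc ++ [String.ofList ("prefix:".toList ++ pre)] else acc) tags
    = tags ++ ((pvSlashTakes clean).drop 1).map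
        (fun pre => String.ofList ("prefix:".toList ++ pre)) := by
  rw [pvSplitOn_single]
  rw [show (fun (acc : List String) (i : Int) =>
        let pre := PySem.Chars.join ['/'] (((pvSplit1 '/' clean).1 :: (pvSplit1 '/' clean).2).take i.toNat)
        if pre ≠ [] then acc ++ [String.ofList ("prefix:".toList ++ pre)] else acc)
      = (fun (acc : List String) (i : Int) =>
          if PySem.Chars.join ['/'] (((pvSplit1 '/' clean).1 :: (pvSplit1 '/' clean).2).take i.toNat) ≠ [] then
            acc ++ [String.ofList ("prefix:".toList ++
              PySem.Chars.join ['/'] (((pvSplit1 '/' clean).1 :: (pvSplit1 '/' clean).2).take i.toNat))]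
          else acc) from rfl]
  rw [PySem.List.foldl_append_ite
      (p := fun i : Int => PySem.Chars.join ['/'] (((pvSplit1 '/' clean).1 :: (pvSplit1 '/' clean).2).take i.toNat) ≠ [])
      (f := fun i : Int => String.ofList ("prefix:".toList ++
        PySem.Chars.join ['/'] (((pvSplit1 '/' clean).1 :: (pvSplit1 '/' clean).2).take i.toNat)))]
  congr 1
  have hfull : (PySem.List.pyRange 2 ((((pvSplit1 '/' clean).1 :: (pvSplit1 '/' clean).2).length : Nat) : Int) 1).filter
      (fun i : Int => decide (PySem.Chars.join ['/'] (((pvSplit1 '/' clean).1 :: (pvSplit1 '/' clean).2).take i.toNat) ≠ []))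
      = PySem.List.pyRange 2 ((((pvSplit1 '/' clean).1 :: (pvSplit1 '/' clean).2).length : Nat) : Int) 1 := by
    refine List.filter_eq_self.mpr ?_
    intro i hi
    rw [PySem.List.mem_pyRange_one] at hi
    obtain ⟨h2i, hin⟩ := hi
    obtain ⟨k, hk⟩ : ∃ k, i.toNat = k + 2 := ⟨i.toNat - 2, by omega⟩
    cases hr : (pvSplit1 '/' clean).2 with
    | nil => exfalso; rw [hr] at hin; simp at hin; omega
    | cons q qs =>
      rw [hk, show k + 2 = (k + 1) + 1 from rfl, List.take_succ_cons, List.take_succ_cons]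
      simpa using pvJoin_ne_nil _ _ _
  rw [hfull]
  rw [PySem.List.pyRange_of_pos 2 _ (by norm_num : (0:Int) < 1)]
  have hcnt : (if (2:Int) < ((((pvSplit1 '/' clean).1 :: (pvSplit1 '/' clean).2).length : Nat) : Int)
        then ((((((pvSplit1 '/' clean).1 :: (pvSplit1 '/' clean).2).length : Nat) : Int) - 2 + 1 - 1) / 1).toNat
        else 0) = (pvSplit1 '/' clean).2.length - 1 := by
    simp only [List.length_cons, Int.ediv_one]
    split_ifs with hlt
    · omega
    · omega
  rw [hcnt, pvDropCore, List.map_map, List.map_map]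
  refine List.map_congr_left ?_
  intro k _
  have ht : ((2:Int) + 1 * (k : Int)).toNat = 2 + k := by omega
  simp only [Function.comp_apply, ht]

-- B's scan, seen = true: one prefix per remaining slash
lemma pvScan_true : ∀ (t : List Char) (pre : List Char) (out : List String),
    pvB_scan t true pre out =
      out ++ ((pvSlashTakes t).map (pre ++ ·)).map
        (fun p => String.ofList ("prefix:".toList ++ p)) := by
  intro t
  induction t with
  | nil => intro pre out; simp [pvB_scan, pvSlashTakes]
  | cons c t ih =>
    intro pre out
    by_cases hc : c = '/'
    · rw [show pvB_scan (c :: t) true pre out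
            = pvB_scan t true (pre ++ [c])
                (out ++ [String.ofList ("prefix:".toList ++ pre)]) by simp [pvB_scan, hc]]
      rw [ih]
      simp [pvSlashTakes, hc, List.map_map, Function.comp_def]
    · rw [show pvB_scan (c :: t) true pre out = pvB_scan t true (pre ++ [c]) out by
          simp [pvB_scan, hc]]
      rw [ih]
      simp [pvSlashTakes, hc, List.map_map, Function.comp_def]

-- B's scan, seen = false: the first slash is skipped
lemma pvScan_false : ∀ (t : List Char) (pre : List Char) (out : List String),
    pvB_scan t false pre out =
      out ++ (((pvSlashTakes t).map (pre ++ ·)).drop 1).map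
        (fun p => String.ofList ("prefix:".toList ++ p)) := by
  intro t
  induction t with
  | nil => intro pre out; simp [pvB_scan, pvSlashTakes]
  | cons c t ih =>
    intro pre out
    by_cases hc : c = '/'
    · rw [show pvB_scan (c :: t) false pre out = pvB_scan t true (pre ++ [c]) out by
          simp [pvB_scan, hc]]
      rw [pvScan_true]
      simp [pvSlashTakes, hc, List.map_map, Function.comp_def]
    · rw [show pvB_scan (c :: t) false pre out = pvB_scan t false (pre ++ [c]) out by
          simp [pvB_scan, hc]]
      rw [ih]
      simp [pvSlashTakes, hc, List.map_map, Function.comp_def]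

lemma pvPath_eq (tags : List String) (p : List Char) :
    pvA_pathTags tags p = tags ++ pvB_pathTags p := by
  unfold pvA_pathTags pvB_pathTags
  have hhead : (PySem.Chars.splitOn p ['?']).headD [] = p.takeWhile (fun c => !(c == '?')) := by
    rw [pvSplitOn_single]; simp [pvSplit1_fst]
  by_cases hp : p = []
  · subst hp; simp
  · simp only [hhead, if_pos hp]
    set clean := ((p.takeWhile (fun c => !(c == '?'))).reverse.dropWhile (fun c => c == '/')).reverse with hcl
    by_cases hc : clean = []
    · simp [hc]
    · simp only [if_pos hc]
      rw [pvA_prefix clean (tags ++ [String.ofList ("path:".toList ++ clean)])]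
      rw [pvScan_false clean [] []]
      simp

-- ===== VERDICT (by name: the statement is the Claim_ definition above) =====
theorem extract_cache_tags_spec : Claim_equal_extract_cache_tags := by
  intro rh path _
  unfold Spec_extract_cache_tags extract_cache_tags extract_cache_tags_alt
  rw [pvPath_eq, pvHeader_eq]
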